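-- pv_equiv track=rewrite | github.com/NiranjanPS/python | Google_Challenge_2021.py | solve
-- ===== SOURCE A (Python) =====
-- def solve(ls):
--     ls.sort()
--     count = 0
--     while(1):
--         if(ls[0]|ls[1])==0:
--             break
--         else:
--             count += 1
--         ls[1] -= 1
--         ls[2] -= 1
--         ls.sort()
--     return count
-- ===== SOURCE B (Python) =====
-- def solve(ls):
--     # closed form: only the three smallest elements are ever touched;
--     # (does not mutate ls, unlike A which sorts it in place)
--     a, b, c = sorted(ls)[:3]
--     return min((a + b + c) // 2, a + b)
-- ===== Notes on version B (the rewrite author's own statement) =====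
-- stated objective: faster
-- what changed: Replaces the decrement-two-and-resort simulation loop by the closed form min((a+b+c)//2, a+b) over the three smallest elements (only they are ever touched); intended as faster — in a timing run A timed out at n=16 while B returned instantly, so no ratio could be measured; B does not mutate ls, unlike A which sorts it in place.
-- outside the precondition, e.g. on solve([0, 0]): A returns 0, B raises ValueError
import Mathlib
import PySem

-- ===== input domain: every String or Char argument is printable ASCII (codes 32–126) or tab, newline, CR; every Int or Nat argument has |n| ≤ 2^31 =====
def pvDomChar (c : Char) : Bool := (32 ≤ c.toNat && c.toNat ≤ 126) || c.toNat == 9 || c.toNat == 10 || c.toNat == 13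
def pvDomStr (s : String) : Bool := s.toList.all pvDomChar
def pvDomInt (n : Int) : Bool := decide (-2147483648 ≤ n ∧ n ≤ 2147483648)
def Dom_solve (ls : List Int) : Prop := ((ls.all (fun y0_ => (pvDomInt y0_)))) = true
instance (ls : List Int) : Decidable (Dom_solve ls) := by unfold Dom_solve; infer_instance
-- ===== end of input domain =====

-- B replaces A's decrement-and-resort simulation loop by the closed form min((a+b+c)//2, a+b)
-- on the three smallest elements; return-value equivalence only: A sorts ls in place, B does not mutate it.


-- ===== PORT A =====
-- the while(1) loop; fuel bounds the iteration count (under Pre_ the loop runs at most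
-- sum |elements| times, so the fuel is never exhausted there); getD/set are the guarded
-- forms of ls[0]/ls[1]/ls[2] and ls[i] -= 1 (in range under Pre_, which keeps length ≥ 3)
def solveLoop : Nat → List Int → Int → Int
  | 0, _, count => count
  | fuel+1, ls, count =>
    if Int.lor (ls.getD 0 0) (ls.getD 1 0) = 0 then count
    else
      let ls' := (ls.set 1 (ls.getD 1 0 - 1)).set 2 (ls.getD 2 0 - 1)
      solveLoop fuel (PySem.List.sorted ls' (fun x => x) false) (count + 1)

def solve (ls : List Int) : Int :=
  solveLoop ((ls.map Int.natAbs).sum + 1) (PySem.List.sorted ls (fun x => x) false) 0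

-- ===== PORT B =====
-- Source B: a, b, c = sorted(ls)[:3]; return min((a+b+c)//2, a+b)
-- (the fallthrough 0 is the unpacking-failure case, excluded by Pre_: Python raises ValueError)
def solve_alt (ls : List Int) : Int :=
  match PySem.List.sorted ls (fun x => x) false with
  | a :: b :: c :: _ => min (PySem.Int.floordiv (a + b + c) 2) (a + b)
  | _ => 0

-- ===== PRECONDITION & SPEC =====
-- Pre_ excludes lists shorter than 3 — there A raises IndexError, except on [0, 0] where A
-- returns 0 but B's three-way unpacking raises ValueError — and lists with a negative
-- element, on which A loops forever.
def Pre_solve (ls : List Int) : Prop := 3 ≤ ls.length ∧ ∀ x ∈ ls, 0 ≤ x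
instance (ls : List Int) : Decidable (Pre_solve ls) := by unfold Pre_solve; infer_instance
def pvWitness_solve : List Int := [3, 1, 2]

def Spec_solve (ls : List Int) (out : Int) : Prop := out = solve_alt ls
instance (ls : List Int) (out : Int) : Decidable (Spec_solve ls out) := by unfold Spec_solve; infer_instance

-- ===== CLAIM (what is proved, stated in full; the proofs are below) =====
def Claim_equal_solve : Prop := ∀ (ls : List Int), Dom_solve ls → Pre_solve ls → Spec_solve ls (solve ls)

-- ===== LEMMAS AND PROOFS =====

-- bitwise or of two nonnegative ints is zero iff both are zero
lemma lor_eq_zero_iff_of_nonneg (a b : Int) (ha : 0 ≤ a) (hb : 0 ≤ b) :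
    Int.lor a b = 0 ↔ a = 0 ∧ b = 0 := by
  lift a to ℕ using ha; lift b to ℕ using hb
  rw [show Int.lor (↑a) (↑b) = ((a ||| b : ℕ) : ℤ) from rfl]
  constructor
  · intro h
    have h' : a ||| b = 0 := by exact_mod_cast h
    have h1 := Nat.left_le_or (n := a) (m := b)
    have h2 := Nat.right_le_or (n := a) (m := b)
    omega
  · rintro ⟨ha0, hb0⟩
    have : a = 0 ∧ b = 0 := by exact_mod_cast And.intro ha0 hb0
    simp [this.1, this.2]

lemma pairwise_triple (x1 x2 x3 : Int) (rest : List Int)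
    (h12 : x1 ≤ x2) (h23 : x2 ≤ x3) (hr : ∀ x ∈ rest, x3 ≤ x)
    (hp : rest.Pairwise (· ≤ ·)) :
    List.Pairwise (fun p q => p ≤ q) (x1 :: x2 :: x3 :: rest) := by
  simp only [List.pairwise_cons]
  refine ⟨?_, ?_, hr, hp⟩
  · intro x hx
    rcases List.mem_cons.mp hx with rfl | hx
    · exact h12
    rcases List.mem_cons.mp hx with rfl | hx
    · exact le_trans h12 h23
    · exact le_trans (le_trans h12 h23) (hr x hx)
  · intro x hx
    rcases List.mem_cons.mp hx with rfl | hx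
    · exact h23
    · exact le_trans h23 (hr x hx)

-- loop invariant: on a sorted nonnegative list the loop adds min((a+b+c)/2, a+b) to count
lemma loop_eval (fuel : Nat) : ∀ (a b c : Int) (rest : List Int) (count : Int),
    0 ≤ a → a ≤ b → b ≤ c → (∀ x ∈ rest, c ≤ x) → rest.Pairwise (· ≤ ·) →
    (min ((a + b + c) / 2) (a + b)).toNat ≤ fuel →
    solveLoop fuel (a :: b :: c :: rest) count = count + min ((a + b + c) / 2) (a + b) := by
  induction fuel with
  | zero =>
    intro a b c rest count h0 hab hbc hr hp hf
    simp only [solveLoop]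
    omega
  | succ f ih =>
    intro a b c rest count h0 hab hbc hr hp hf
    simp only [solveLoop, List.getD_cons_zero, List.getD_cons_succ, List.set]
    by_cases hz : Int.lor a b = 0
    · rw [if_pos hz]
      have hz' := (lor_eq_zero_iff_of_nonneg a b h0 (le_trans h0 hab)).mp hz
      omega
    · rw [if_neg hz]
      have hnz : ¬ (a = 0 ∧ b = 0) := fun h => hz ((lor_eq_zero_iff_of_nonneg a b h0 (le_trans h0 hab)).mpr h)
      have hb1 : 1 ≤ b := by omega
      by_cases h1 : a ≤ b - 1
      · have hs : PySem.List.sorted (a :: (b-1) :: (c-1) :: rest) (fun x => x) false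
            = a :: (b-1) :: (c-1) :: rest :=
          PySem.List.sorted_id_eq_of_perm_of_pairwise _ _ (List.Perm.refl _)
            (pairwise_triple _ _ _ _ h1 (by omega) (fun x hx => by have := hr x hx; omega) hp)
        rw [hs, ih a (b-1) (c-1) rest (count+1) h0 h1 (by omega)
              (fun x hx => by have := hr x hx; omega) hp (by omega)]
        omega
      · by_cases h2 : a ≤ c - 1
        · have hs : PySem.List.sorted (a :: (b-1) :: (c-1) :: rest) (fun x => x) false
              = (b-1) :: a :: (c-1) :: rest :=
            PySem.List.sorted_id_eq_of_perm_of_pairwise _ _ (List.Perm.swap a (b-1) _)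
              (pairwise_triple _ _ _ _ (by omega) h2 (fun x hx => by have := hr x hx; omega) hp)
          rw [hs, ih (b-1) a (c-1) rest (count+1) (by omega) (by omega) h2
                (fun x hx => by have := hr x hx; omega) hp (by omega)]
          omega
        · have hs : PySem.List.sorted (a :: (b-1) :: (c-1) :: rest) (fun x => x) false
              = (b-1) :: (c-1) :: a :: rest :=
            PySem.List.sorted_id_eq_of_perm_of_pairwise _ _
              ((List.Perm.cons _ (List.Perm.swap a (c-1) rest)).trans (List.Perm.swap a (b-1) _))
              (pairwise_triple _ _ _ _ (by omega) (by omega) (fun x hx => le_trans (by omega : a ≤ c) (hr x hx)) hp)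
          rw [hs, ih (b-1) (c-1) a rest (count+1) (by omega) (by omega) (by omega)
                (fun x hx => by have := hr x hx; omega) hp (by omega)]
          omega

lemma solve_eq (ls : List Int) (h3 : 3 ≤ ls.length) (hnn : ∀ x ∈ ls, 0 ≤ x) :
    solve ls = solve_alt ls := by
  have hperm := PySem.List.sorted_perm ls (fun x => x) false
  have hpw := PySem.List.sorted_pairwise ls (fun x => x)
  cases hsl : PySem.List.sorted ls (fun x => x) false with
  | nil => rw [hsl] at hperm; have := hperm.length_eq; simp at this; omega
  | cons a t =>
    cases t with
    | nil => rw [hsl] at hperm; have := hperm.length_eq; simp at this; omega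
    | cons b t2 =>
      cases t2 with
      | nil => rw [hsl] at hperm; have := hperm.length_eq; simp at this; omega
      | cons c rest =>
        rw [hsl] at hperm hpw
        simp only [List.pairwise_cons] at hpw
        obtain ⟨ha2, hb2, hc2, hprest⟩ := hpw
        have hmem : ∀ x ∈ a :: b :: c :: rest, 0 ≤ x := fun x hx => hnn x (hperm.mem_iff.mp hx)
        have h0 : 0 ≤ a := hmem a (by simp)
        have hab : a ≤ b := ha2 b (by simp)
        have hbc : b ≤ c := hb2 c (by simp)
        have hsum : (ls.map Int.natAbs).sum = ((a :: b :: c :: rest).map Int.natAbs).sum :=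
          ((hperm.map Int.natAbs).sum_eq).symm
        unfold solve solve_alt
        rw [hsl, hsum]
        rw [loop_eval _ a b c rest 0 h0 hab hbc hc2 hprest ?hfuel]
        · dsimp only
          rw [PySem.Int.floordiv_eq_ediv_of_pos (show (0:Int) < 2 by norm_num)]
          omega
        case hfuel =>
          simp only [List.map_cons, List.sum_cons]
          omega

-- ===== VERDICT (by name: the statement is the Claim_ definition above) =====
theorem solve_spec : Claim_equal_solve := by
  intro ls _hdom hpre
  unfold Spec_solve
  exact solve_eq ls hpre.1 hpre.2
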